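-- pv_equiv track=rewrite | github.com/thealexwilson/doyouevenlinux | create_protondb_summary.py | classify_verdict
-- ===== SOURCE A (Python) =====
-- def classify_verdict(verdict: str) -> str:
--     """Classify a verdict string into a ProtonDB tier."""
--     if not verdict or verdict.strip() == '':
--         return 'pending'
--
--     verdict_lower = verdict.lower().strip()
--
--     # Simple mapping: yes = works (gold), no = broken (borked)
--     if verdict_lower == 'yes':
--         return 'gold'  # Works well
--     elif verdict_lower == 'no':
--         return 'borked'  # Doesn't work
--     else:
--         # For descriptive verdicts, look for keywords
--         if any(word in verdict_lower for word in ['perfect', 'flawless', 'platinum']):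
--             return 'platinum'
--         elif any(word in verdict_lower for word in ['great', 'fine', 'well', 'ootb', 'just works']):
--             return 'gold'
--         elif any(word in verdict_lower for word in ['issues', 'crashes', 'bugs']):
--             return 'silver'
--         elif 'no' in verdict_lower or 'broken' in verdict_lower or 'borked' in verdict_lower:
--             return 'borked'
--         else:
--             return 'gold'  # Default to gold for positive-sounding verdicts
-- ===== SOURCE B (Python) =====
-- PLATINUM_KWS = ('perfect', 'flawless', 'platinum')
-- GOLD_KWS = ('great', 'fine', 'well', 'ootb', 'just works')
-- SILVER_KWS = ('issues', 'crashes', 'bugs')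
-- BORKED_KWS = ('no', 'broken', 'borked')
--
--
-- def classify_verdict(verdict: str) -> str:
--     """Classify a verdict string into a ProtonDB tier.
--
--     Single left-to-right scan: at each position record which keyword
--     groups start there, then pick the best flagged tier (default gold).
--     """
--     if not verdict.strip():
--         return 'pending'
--     v = verdict.lower().strip()
--     plat = gold = silver = borked = False
--     for i in range(len(v)):
--         plat = plat or v.startswith(PLATINUM_KWS, i)
--         gold = gold or v.startswith(GOLD_KWS, i)
--         silver = silver or v.startswith(SILVER_KWS, i)
--         borked = borked or v.startswith(BORKED_KWS, i)
--     if plat: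
--         return 'platinum'
--     if gold:
--         return 'gold'
--     if silver:
--         return 'silver'
--     if borked:
--         return 'borked'
--     return 'gold'
-- ===== Notes on version B (the rewrite author's own statement) =====
-- stated objective: alternative
-- what changed: Replaced A's early-return cascade of per-keyword substring ('in') searches, plus its special 'yes'/'no' equality branches, by a single left-to-right scan of the text that accumulates four tier flags (does any keyword of this group start at this position?) and only afterwards selects the best flagged tier, defaulting to gold.
import Mathlib
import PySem

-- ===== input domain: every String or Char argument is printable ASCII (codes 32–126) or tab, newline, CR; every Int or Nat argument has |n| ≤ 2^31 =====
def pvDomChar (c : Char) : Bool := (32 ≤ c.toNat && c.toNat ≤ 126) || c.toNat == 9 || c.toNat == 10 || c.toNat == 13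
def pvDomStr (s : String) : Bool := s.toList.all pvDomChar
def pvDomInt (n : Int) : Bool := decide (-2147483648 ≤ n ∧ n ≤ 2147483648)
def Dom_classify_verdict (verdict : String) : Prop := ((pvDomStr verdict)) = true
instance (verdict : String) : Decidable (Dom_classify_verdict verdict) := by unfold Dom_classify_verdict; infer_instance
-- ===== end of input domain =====

-- B replaces A's early-return cascade of substring searches (and the 'yes'/'no' equality
-- branches) by one left-to-right scan accumulating four tier flags, deciding afterwards
-- (objective: alternative); same return value everywhere.

-- ===== PORT A =====
-- the else-chain of A, on the lowered+stripped verdict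
def pvChainA (v : String) : String :=
  if v == "yes" then "gold"
  else if v == "no" then "borked"
  else if (["perfect", "flawless", "platinum"].any (fun w => PySem.Str.isIn w v)) then "platinum"
  else if (["great", "fine", "well", "ootb", "just works"].any (fun w => PySem.Str.isIn w v)) then "gold"
  else if (["issues", "crashes", "bugs"].any (fun w => PySem.Str.isIn w v)) then "silver"
  else if (PySem.Str.isIn "no" v || PySem.Str.isIn "broken" v || PySem.Str.isIn "borked" v) then "borked"
  else "gold"

def classify_verdict (verdict : String) : String :=
  if verdict == "" || PySem.Str.strip verdict == "" then "pending"
  else pvChainA (PySem.Str.strip (PySem.Str.lower verdict))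

-- ===== PORT B =====
def pvPlatKws : List (List Char) := ["perfect".toList, "flawless".toList, "platinum".toList]
def pvGoldKws : List (List Char) := ["great".toList, "fine".toList, "well".toList, "ootb".toList, "just works".toList]
def pvSilverKws : List (List Char) := ["issues".toList, "crashes".toList, "bugs".toList]
def pvBorkedKws : List (List Char) := ["no".toList, "broken".toList, "borked".toList]

-- v.startswith(kws, i): does some keyword of the group start at this suffix?
def pvStarts (s : List Char) (kws : List (List Char)) : Bool :=
  kws.any (fun k => k.isPrefixOf s)

-- the scan loop: walk the suffixes left to right, or-ing the four flags
def pvScanB : List Char → Bool → Bool → Bool → Bool → Bool × Bool × Bool × Bool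
  | [], p, g, si, bo => (p, g, si, bo)
  | s@(_ :: rest), p, g, si, bo =>
      pvScanB rest (p || pvStarts s pvPlatKws) (g || pvStarts s pvGoldKws)
        (si || pvStarts s pvSilverKws) (bo || pvStarts s pvBorkedKws)

def classify_verdict_alt (verdict : String) : String :=
  if PySem.Str.strip verdict == "" then "pending"
  else
    let v := PySem.Str.strip (PySem.Str.lower verdict)
    let r := pvScanB v.toList false false false false
    if r.1 then "platinum"
    else if r.2.1 then "gold"
    else if r.2.2.1 then "silver"
    else if r.2.2.2 then "borked"
    else "gold"

-- ===== PRECONDITION & SPEC =====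
def Spec_classify_verdict (verdict : String) (out : String) : Prop := out = classify_verdict_alt verdict
instance (verdict : String) (out : String) : Decidable (Spec_classify_verdict verdict out) := by unfold Spec_classify_verdict; infer_instance

-- ===== CLAIM =====
def Claim_equal_classify_verdict : Prop := ∀ (verdict : String), Dom_classify_verdict verdict → Spec_classify_verdict verdict (classify_verdict verdict)

-- ===== LEMMAS AND PROOFS =====

-- "does some group keyword occur anywhere in s" (the semantic value of a flag)
def pvOcc (s : List Char) (kws : List (List Char)) : Bool :=
  kws.any (fun k => PySem.Chars.isIn k s)

theorem pv_prefix_or_isIn (k : List Char) (c : Char) (rest : List Char) :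
    (k.isPrefixOf (c :: rest) || PySem.Chars.isIn k rest) = PySem.Chars.isIn k (c :: rest) := by
  rw [Bool.eq_iff_iff]
  simp [List.isPrefixOf_iff_prefix, PySem.Chars.isIn_iff_infix, List.infix_cons_iff]

theorem pv_starts_or_occ (c : Char) (rest : List Char) (kws : List (List Char)) :
    (pvStarts (c :: rest) kws || pvOcc rest kws) = pvOcc (c :: rest) kws := by
  induction kws with
  | nil => simp [pvStarts, pvOcc]
  | cons k ks ih =>
      simp only [pvStarts, pvOcc, List.any_cons] at *
      rw [← ih, ← pv_prefix_or_isIn k c rest]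
      cases k.isPrefixOf (c :: rest) <;> cases PySem.Chars.isIn k rest <;> simp

theorem pv_occ_nil (kws : List (List Char)) (h : ∀ k ∈ kws, k ≠ []) : pvOcc [] kws = false := by
  simp only [pvOcc, List.any_eq_false]
  intro k hk hin
  rw [PySem.Chars.isIn_iff_infix] at hin
  exact h k hk (List.eq_nil_of_infix_nil hin)

-- the scan computes exactly the four occurrence flags
theorem pv_scan_eq (s : List Char) (p g si bo : Bool) :
    pvScanB s p g si bo =
      (p || pvOcc s pvPlatKws, g || pvOcc s pvGoldKws,
       si || pvOcc s pvSilverKws, bo || pvOcc s pvBorkedKws) := by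
  induction s generalizing p g si bo with
  | nil =>
      rw [pvScanB, pv_occ_nil pvPlatKws (by decide), pv_occ_nil pvGoldKws (by decide),
        pv_occ_nil pvSilverKws (by decide), pv_occ_nil pvBorkedKws (by decide)]
      simp
  | cons c rest ih =>
      rw [pvScanB, ih]
      rw [Bool.or_assoc, Bool.or_assoc, Bool.or_assoc, Bool.or_assoc,
        pv_starts_or_occ, pv_starts_or_occ, pv_starts_or_occ, pv_starts_or_occ]

-- the two guards agree: "not verdict or verdict.strip()==''" iff "not verdict.strip()"
theorem pv_guard_eq (verdict : String) :
    (verdict == "" || PySem.Str.strip verdict == "") = (PySem.Str.strip verdict == "") := by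
  by_cases h : verdict = ""
  · subst h; decide
  · simp [h]

-- A's else-chain equals B's flag decision, for every string v
theorem pv_chain_eq (v : String) :
    pvChainA v =
      (if pvOcc v.toList pvPlatKws then "platinum"
       else if pvOcc v.toList pvGoldKws then "gold"
       else if pvOcc v.toList pvSilverKws then "silver"
       else if pvOcc v.toList pvBorkedKws then "borked"
       else "gold") := by
  by_cases h1 : v = "yes"
  · subst h1; decide
  by_cases h2 : v = "no"
  · subst h2; decide
  simp [pvChainA, pvOcc, pvPlatKws, pvGoldKws, pvSilverKws, pvBorkedKws, h1, h2,
    PySem.Str.isIn_eq, Bool.or_assoc]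

-- ===== VERDICT =====
theorem classify_verdict_spec : Claim_equal_classify_verdict := by
  intro verdict _
  unfold Spec_classify_verdict classify_verdict classify_verdict_alt
  rw [pv_guard_eq]
  by_cases h : PySem.Str.strip verdict == ""
  · simp [h]
  · simp only [h, if_false, Bool.false_eq_true]
    rw [pv_scan_eq]
    simp only [Bool.false_or]
    exact pv_chain_eq _
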